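-- pv_equiv track=rewrite | github.com/nampi/leetcode | algoprod/2B/technology/censor.py | is_good_phrase
-- ===== SOURCE A (Python) =====
-- def is_good_word(w):
--     symb = ""
--     for c in w:
--         if c in symb:
--             continue
--         else:
--             symb += c
--     return len(symb) > 3
--
-- def is_good_phrase(s):
--     marks = ".!?:-,;() "
--     word = ""
--     all_words = 0
--     good_words = 0
--     for c in s:
--         if c not in marks:
--             word += c
--         elif word:
--             all_words += 1
--             good_words += int(is_good_word(word))
--             word = ""
--
--     return 2 * good_words > all_words
-- ===== SOURCE B (Python) =====
-- def is_good_phrase(s):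
--     # A phrase is a sequence of words, each terminated by a punctuation mark;
--     # it is good when more than half of its words use more than 3 distinct letters.
--     marks = set(".!?:-,;() ")
--     cuts = [i for i, c in enumerate(s) if c in marks]
--     segments = [s[a + 1:b] for a, b in zip([-1] + cuts, cuts)]
--     words = [w for w in segments if w]
--     good = sum(len(set(w)) > 3 for w in words)
--     return 2 * good > len(words)
-- ===== Notes on version B (the rewrite author's own statement) =====
-- stated objective: alternative
-- what changed: A runs a fused char-by-char state machine accumulating the current word and two counters (deduplicating each word by appending unseen chars to a string); B tokenizes declaratively: it computes the positions of the punctuation marks, slices out the segment ending at each mark, filters out empty segments, and folds a distinct-char count over the word list.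
import Mathlib
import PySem

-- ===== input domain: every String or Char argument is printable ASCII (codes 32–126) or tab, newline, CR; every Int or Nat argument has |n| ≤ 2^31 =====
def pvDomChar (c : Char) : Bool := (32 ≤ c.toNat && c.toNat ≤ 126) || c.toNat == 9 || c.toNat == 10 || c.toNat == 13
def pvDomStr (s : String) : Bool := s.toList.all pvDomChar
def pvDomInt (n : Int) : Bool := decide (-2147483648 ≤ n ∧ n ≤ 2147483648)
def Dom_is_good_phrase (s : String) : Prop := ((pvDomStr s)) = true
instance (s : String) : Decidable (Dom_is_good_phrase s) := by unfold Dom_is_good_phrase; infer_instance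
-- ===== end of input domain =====

-- B replaces A's fused char-by-char state machine by a declarative tokenizer:
-- mark positions -> segments between consecutive marks -> drop empties -> count;
-- objective: alternative decomposition, same O(n) cost.

-- ===== PORT A =====
def pvMarks : List Char := ['.', '!', '?', ':', '-', ',', ';', '(', ')', ' ']

-- A's is_good_word: build symb by appending each unseen char, then len(symb) > 3
def is_good_word (w : List Char) : Bool :=
  let symb := w.foldl (fun symb c => if symb.contains c then symb else symb ++ [c]) ([] : List Char)
  decide (symb.length > 3)

-- A's loop body, as a named function over the state (word, all_words, good_words)
def pvAStep (st : List Char × Int × Int) (c : Char) : List Char × Int × Int :=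
  if !(pvMarks.contains c) then (st.1 ++ [c], st.2.1, st.2.2)
  else if st.1 ≠ [] then ([], st.2.1 + 1, st.2.2 + (if is_good_word st.1 then 1 else 0))
  else st

def is_good_phrase (s : String) : Bool :=
  let st := s.toList.foldl pvAStep (([] : List Char), (0 : Int), (0 : Int))
  decide (2 * st.2.2 > st.2.1)

-- ===== PORT B =====
def is_good_phrase_alt (s : String) : Bool :=
  let cs := s.toList
  let marks : PySem.Set Char := PySem.Set.ofList ".!?:-,;() ".toList
  let cuts : List Int := (PySem.List.enumerate cs).filterMap
      (fun ic => if marks.contains ic.2 then some ic.1 else none)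
  let segments := (((-1 : Int) :: cuts).zip cuts).map
      (fun ab => PySem.List.slice cs (some (ab.1 + 1)) (some ab.2))
  let words := segments.filter (fun w => !w.isEmpty)
  let good : Int := (words.map (fun w => if (PySem.Set.ofList w).length > 3 then (1 : Int) else 0)).sum
  decide (2 * good > (words.length : Int))

-- ===== PRECONDITION & SPEC =====
def Spec_is_good_phrase (s : String) (out : Bool) : Prop := out = is_good_phrase_alt s
instance (s : String) (out : Bool) : Decidable (Spec_is_good_phrase s out) := by unfold Spec_is_good_phrase; infer_instance

-- ===== CLAIM (what is proved, stated in full; the proofs are below) =====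
def Claim_equal_is_good_phrase : Prop := ∀ (s : String), Dom_is_good_phrase s → Spec_is_good_phrase s (is_good_phrase s)

-- ===== LEMMAS AND PROOFS =====

-- reference token list: the mark-terminated maximal mark-free runs, `w` being the
-- run accumulated so far
def pvTok (w : List Char) : List Char → List (List Char)
  | [] => []
  | c :: cs =>
    if pvMarks.contains c then
      (if w = [] then pvTok [] cs else w :: pvTok [] cs)
    else pvTok (w ++ [c]) cs

def pvGood (w : List Char) : Int := if (PySem.Set.ofList w).length > 3 then 1 else 0

def pvGoodSum (ts : List (List Char)) : Int := (ts.map pvGood).sum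

theorem is_good_word_eq (w : List Char) :
    is_good_word w = decide ((PySem.Set.ofList w).length > 3) := by
  have h : w.foldl (fun symb c => if symb.contains c then symb else symb ++ [c]) ([] : List Char)
      = PySem.Set.ofList w := by
    rw [PySem.Set.ofList_eq_foldl]
    rfl
  unfold is_good_word
  rw [h]

theorem pvTok_cons_mark {c : Char} {w : List Char} (cs : List Char)
    (hc : c ∈ pvMarks) (hw : w ≠ []) : pvTok w (c :: cs) = w :: pvTok [] cs := by
  simp [pvTok, hc, hw]

theorem pvTok_cons_mark_nil {c : Char} (cs : List Char) (hc : c ∈ pvMarks) :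
    pvTok [] (c :: cs) = pvTok [] cs := by
  simp [pvTok, hc]

theorem pvTok_cons_nonmark {c : Char} {w : List Char} (cs : List Char) (hc : c ∉ pvMarks) :
    pvTok w (c :: cs) = pvTok (w ++ [c]) cs := by
  simp [pvTok, hc]

-- A's loop computes exactly (all_words, good_words) of the reference token list
theorem aLoop_eq (cs : List Char) : ∀ (w : List Char) (a g : Int),
    (cs.foldl pvAStep (w, a, g)).2 =
      (a + ((pvTok w cs).length : Int), g + pvGoodSum (pvTok w cs)) := by
  induction cs with
  | nil => intro w a g; simp [pvTok, pvGoodSum]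
  | cons c cs ih =>
    intro w a g
    rw [List.foldl_cons]
    by_cases hc : c ∈ pvMarks
    · by_cases hw : w = []
      · subst hw
        rw [show pvAStep ([], a, g) c = ([], a, g) by simp [pvAStep, hc]]
        rw [ih, pvTok_cons_mark_nil cs hc]
      · rw [show pvAStep (w, a, g) c =
            ([], a + 1, g + (if is_good_word w then 1 else 0)) by simp [pvAStep, hc, hw]]
        rw [ih, pvTok_cons_mark cs hc hw, Prod.mk.injEq]
        simp only [pvGoodSum, List.map_cons, List.sum_cons, List.length_cons, is_good_word_eq,
          decide_eq_true_eq, pvGood]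
        constructor <;> push_cast <;> ring
    · rw [show pvAStep (w, a, g) c = (w ++ [c], a, g) by simp [pvAStep, hc]]
      rw [ih, pvTok_cons_nonmark cs hc]

-- the segments between consecutive marks (last, un-terminated segment omitted)
def pvSegs : List Char → List (List Char)
  | [] => []
  | c :: cs =>
    if pvMarks.contains c then [] :: pvSegs cs
    else match pvSegs cs with
      | [] => []
      | w :: ws => (c :: w) :: ws

-- the token list is the segment list with empties filtered out
theorem pvTok_eq_filter_gen (cs : List Char) : ∀ (w : List Char),
    pvTok w cs = (match pvSegs cs with
      | [] => ([] : List (List Char))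
      | s0 :: ss => (w ++ s0) :: ss).filter (fun t => !t.isEmpty) := by
  induction cs with
  | nil => intro w; simp [pvTok, pvSegs]
  | cons c cs ih =>
    intro w
    by_cases hc : c ∈ pvMarks
    · rw [show pvSegs (c :: cs) = [] :: pvSegs cs by simp [pvSegs, hc]]
      have ihw := ih []
      by_cases hw : w = []
      · subst hw
        rw [pvTok_cons_mark_nil cs hc, ihw]
        cases hS : pvSegs cs <;> simp
      · rw [pvTok_cons_mark cs hc hw, ihw]
        cases hS : pvSegs cs <;> simp [hw]
    · rw [pvTok_cons_nonmark cs hc, ih (w ++ [c])]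
      cases hS : pvSegs cs with
      | nil => simp [pvSegs, hc, hS]
      | cons s0 ss => simp [pvSegs, hc, hS]

theorem pvTok_eq_filter (cs : List Char) :
    pvTok [] cs = (pvSegs cs).filter (fun t => !t.isEmpty) := by
  rw [pvTok_eq_filter_gen cs []]
  cases hS : pvSegs cs <;> simp

-- mark positions, enumerate starting at s
def pvCutsFrom (s : Int) (cs : List Char) : List Int :=
  (PySem.List.enumerate cs s).filterMap
    (fun ic => if pvMarks.contains ic.2 then some ic.1 else none)

theorem pvCutsFrom_cons (s : Int) (c : Char) (cs : List Char) :
    pvCutsFrom s (c :: cs) =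
      if c ∈ pvMarks then s :: pvCutsFrom (s + 1) cs else pvCutsFrom (s + 1) cs := by
  simp only [pvCutsFrom, PySem.List.enumerate_cons, List.filterMap_cons]
  by_cases hc : c ∈ pvMarks <;> simp [hc]

theorem pvCutsFrom_shift (cs : List Char) : ∀ s : Int,
    pvCutsFrom (s + 1) cs = (pvCutsFrom s cs).map (· + 1) := by
  induction cs with
  | nil => intro s; simp [pvCutsFrom]
  | cons c cs ih =>
    intro s
    rw [pvCutsFrom_cons, pvCutsFrom_cons, ih (s + 1), ih s]
    by_cases hc : c ∈ pvMarks <;> simp [hc]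

theorem pvCutsFrom_nonneg (cs : List Char) : ∀ (s x : Int), x ∈ pvCutsFrom s cs → s ≤ x := by
  induction cs with
  | nil => intro s x hx; simp [pvCutsFrom] at hx
  | cons c cs ih =>
    intro s x hx
    rw [pvCutsFrom_cons] at hx
    by_cases hc : c ∈ pvMarks
    · rw [if_pos hc] at hx
      rcases List.mem_cons.mp hx with h | h
      · omega
      · have := ih (s + 1) x h; omega
    · rw [if_neg hc] at hx
      have := ih (s + 1) x hx; omega

theorem pvSegs_len (cs : List Char) : (pvSegs cs).length = (pvCutsFrom 0 cs).length := by
  induction cs with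
  | nil => simp [pvSegs, pvCutsFrom]
  | cons c cs ih =>
    rw [pvCutsFrom_cons]
    by_cases hc : c ∈ pvMarks
    · simp only [pvSegs, List.contains_eq_mem, hc, decide_true, if_true, List.length_cons]
      rw [show (0:Int) + 1 = 0 + 1 by rfl, pvCutsFrom_shift, List.length_map, ← ih]
    · simp only [pvSegs, List.contains_eq_mem, hc, decide_false, Bool.false_eq_true, if_false]
      rw [pvCutsFrom_shift, List.length_map, ← ih]
      cases hS : pvSegs cs <;> simp

-- index shift for slices with nonnegative bounds
theorem pvSlice_shift (c : Char) (cs : List Char) (a b : Int) (ha : 0 ≤ a) (hb : 0 ≤ b) :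
    PySem.List.slice (c :: cs) (some (a + 1)) (some (b + 1)) =
      PySem.List.slice cs (some a) (some b) := by
  rw [PySem.List.slice_toNat _ (by omega) (by omega), PySem.List.slice_toNat _ ha hb]
  have h1 : (a + 1).toNat = a.toNat + 1 := by omega
  have h2 : (b + 1).toNat = b.toNat + 1 := by omega
  rw [h1, h2]
  simp [Nat.succ_sub_succ]

theorem pvSlice_zero (xs : List Char) (b : Int) (hb : 0 ≤ b) :
    PySem.List.slice xs (some 0) (some b) = xs.take b.toNat := by
  rw [PySem.List.slice_toNat _ (by omega) hb]
  simp

-- B's segment construction yields exactly the segments between consecutive marks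
theorem pvBSegs_eq (cs : List Char) :
    ((((-1 : Int) :: pvCutsFrom 0 cs).zip (pvCutsFrom 0 cs)).map
      (fun ab => PySem.List.slice cs (some (ab.1 + 1)) (some ab.2))) = pvSegs cs := by
  induction cs with
  | nil => simp [pvCutsFrom, pvSegs]
  | cons c cs ih =>
    have hshift : pvCutsFrom (0 + 1) cs = (pvCutsFrom 0 cs).map (· + 1) := pvCutsFrom_shift cs 0
    have hnn : ∀ x ∈ pvCutsFrom 0 cs, 0 ≤ x := fun x hx => pvCutsFrom_nonneg cs 0 x hx
    rw [pvCutsFrom_cons]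
    by_cases hc : c ∈ pvMarks
    · rw [if_pos hc]
      rw [show (0:Int) + 1 = 0 + 1 by rfl, hshift]
      -- head pair (-1, 0); tail = zip of shifted lists
      have htail : ((0 :: (pvCutsFrom 0 cs).map (· + 1)).zip ((pvCutsFrom 0 cs).map (· + 1)))
          = (((-1 : Int) :: pvCutsFrom 0 cs).zip (pvCutsFrom 0 cs)).map
              (fun ab => (ab.1 + 1, ab.2 + 1)) := by
        rw [show (0 : Int) :: (pvCutsFrom 0 cs).map (· + 1)
            = ((-1 : Int) :: pvCutsFrom 0 cs).map (· + 1) by simp]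
        rw [List.zip_map]
        apply List.map_congr_left
        intro ab _
        rfl
      simp only [List.zip_cons_cons, List.map_cons, htail, List.map_map]
      have hhead : PySem.List.slice (c :: cs) (some ((-1 : Int) + 1)) (some 0) = [] := by
        rw [show (-1 : Int) + 1 = 0 by ring, pvSlice_zero _ 0 (by omega)]
        simp
      have hmap : (((-1 : Int) :: pvCutsFrom 0 cs).zip (pvCutsFrom 0 cs)).map
            ((fun ab => PySem.List.slice (c :: cs) (some (ab.1 + 1)) (some ab.2)) ∘
              (fun ab => (ab.1 + 1, ab.2 + 1)))
          = (((-1 : Int) :: pvCutsFrom 0 cs).zip (pvCutsFrom 0 cs)).map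
            (fun ab => PySem.List.slice cs (some (ab.1 + 1)) (some ab.2)) := by
        apply List.map_congr_left
        intro ab hab
        have h1 : ab.1 ∈ (-1 : Int) :: pvCutsFrom 0 cs := (List.of_mem_zip hab).1
        have h2 : ab.2 ∈ pvCutsFrom 0 cs := (List.of_mem_zip hab).2
        have ha1 : (-1 : Int) ≤ ab.1 := by
          rcases List.mem_cons.mp h1 with h | h
          · omega
          · have := hnn _ h; omega
        have hb2 : 0 ≤ ab.2 := hnn _ h2
        simp only [Function.comp_apply]
        rw [show ab.1 + 1 + 1 = (ab.1 + 1) + 1 by ring]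
        exact pvSlice_shift c cs (ab.1 + 1) ab.2 (by omega) hb2
      rw [hhead, hmap, ih]
      simp [pvSegs, hc]

    · rw [if_neg hc]
      rw [show (0:Int) + 1 = 0 + 1 by rfl, hshift]
      cases hK : pvCutsFrom 0 cs with
      | nil =>
        have hlen : pvSegs cs = [] := by
          have := pvSegs_len cs
          rw [hK] at this
          exact List.eq_nil_of_length_eq_zero (by simpa using this)
        simp [pvSegs, hc, hlen]
      | cons k0 K' =>
        have hk0 : (0:Int) ≤ k0 := hnn k0 (by rw [hK]; simp)
        have hnn' : ∀ x ∈ K', (0:Int) ≤ x := fun x hx => hnn x (by rw [hK]; simp [hx])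
        -- LHS structure
        simp only [List.map_cons, List.zip_cons_cons]
        have hhead : PySem.List.slice (c :: cs) (some ((-1 : Int) + 1)) (some (k0 + 1))
            = c :: PySem.List.slice cs (some 0) (some k0) := by
          rw [show (-1 : Int) + 1 = 0 by ring, pvSlice_zero _ (k0+1) (by omega),
            pvSlice_zero _ k0 hk0]
          rw [show (k0 + 1).toNat = k0.toNat + 1 by omega]
          simp
        have htail : (((k0 + 1) :: K'.map (· + 1)).zip (K'.map (· + 1))).map
              (fun ab => PySem.List.slice (c :: cs) (some (ab.1 + 1)) (some ab.2))
            = ((k0 :: K').zip K').map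
              (fun ab => PySem.List.slice cs (some (ab.1 + 1)) (some ab.2)) := by
          rw [show (k0 + 1) :: K'.map (· + 1) = (k0 :: K').map (· + 1) by simp]
          rw [List.zip_map, List.map_map]
          apply List.map_congr_left
          intro ab hab
          have h1 : ab.1 ∈ k0 :: K' := (List.of_mem_zip hab).1
          have h2 : ab.2 ∈ K' := (List.of_mem_zip hab).2
          have ha1 : (0:Int) ≤ ab.1 := by
            rcases List.mem_cons.mp h1 with h | h
            · omega
            · exact hnn' _ h
          have hb2 : (0:Int) ≤ ab.2 := hnn' _ h2
          simp only [Function.comp_apply, Prod.map_fst, Prod.map_snd]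
          rw [show ab.1 + 1 + 1 = (ab.1 + 1) + 1 by ring]
          exact pvSlice_shift c cs (ab.1 + 1) ab.2 (by omega) hb2
        -- IH structure
        have ihK := ih
        rw [hK] at ihK
        simp only [List.zip_cons_cons, List.map_cons] at ihK
        have hSeq : pvSegs (c :: cs) =
            (c :: PySem.List.slice cs (some ((-1:Int) + 1)) (some k0)) ::
              ((k0 :: K').zip K').map
                (fun ab => PySem.List.slice cs (some (ab.1 + 1)) (some ab.2)) := by
          simp only [pvSegs, List.contains_eq_mem, hc, decide_false, Bool.false_eq_true, if_false]
          rw [← ihK]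
        rw [hSeq]
        rw [show (-1:Int) + 1 = 0 by ring] at *
        rw [hhead, htail]

-- bridge: B's marks set is A's mark list
theorem pvMarksB_eq : PySem.Set.ofList ".!?:-,;() ".toList = pvMarks := by decide

-- ===== VERDICT (by name: the statement is the Claim_ definition above) =====
theorem is_good_phrase_spec : Claim_equal_is_good_phrase := by
  intro s _
  unfold Spec_is_good_phrase is_good_phrase is_good_phrase_alt
  dsimp only
  rw [pvMarksB_eq, aLoop_eq s.toList [] 0 0]
  rw [show (PySem.List.enumerate s.toList).filterMap
      (fun ic => if PySem.Set.contains pvMarks ic.2 then some ic.1 else none) = pvCutsFrom 0 s.toList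
    from rfl]
  rw [pvBSegs_eq s.toList, ← pvTok_eq_filter s.toList]
  simp only [Int.zero_add, pvGoodSum]
  rfl
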